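-- pv_equiv track=rewrite | github.com/DA-testa/parallel-processing-Ricardsmm221RDB246 | main.py | parallel_processing
-- ===== SOURCE A (Python) =====
-- import heapq
-- import heapq
--
-- def parallel_processing(n, m, data):
--     # create a priority queue of (available_time, thread_id)
--     queue = [(0, i) for i in range(n)]
--
--     # create a list to store the output pairs
--     output = []
--
--     for job_id, job_time in enumerate(data):
--         # get the earliest available thread from the priority queue
--         available_time, thread_id = heapq.heappop(queue)
--
--         # calculate the time when the job will be completed
--         start_time = max(job_time, available_time)
--         finish_time = start_time + job_time
--
--         # add the output pair to the output list
--         output.append((thread_id, start_time))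
--
--         # add the thread back to the priority queue with the updated available time
--         heapq.heappush(queue, (finish_time, thread_id))
--
--     return output
-- ===== SOURCE B (Python) =====
-- def parallel_processing(n, m, data):
--     # per-thread next-available times; find the busiest-free thread by a
--     # first-minimum scan (ties go to the smaller index, like the heap's tuple order)
--     avail = [0] * n
--     out = []
--     for t in data:
--         best = 0
--         for i in range(1, n):
--             if avail[i] < avail[best]:
--                 best = i
--         a = avail[best]
--         s = a if a > t else t
--         out.append((best, s))
--         avail[best] = s + t
--     return out
-- ===== Notes on version B (the rewrite author's own statement) =====
-- stated objective: alternative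
-- what changed: Replaces the heapq priority queue by a plain per-thread available-time array with a first-minimum linear scan per job (ties to the smaller index, reproducing the heap's (time, id) tuple order); no heap is maintained.
import Mathlib
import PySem

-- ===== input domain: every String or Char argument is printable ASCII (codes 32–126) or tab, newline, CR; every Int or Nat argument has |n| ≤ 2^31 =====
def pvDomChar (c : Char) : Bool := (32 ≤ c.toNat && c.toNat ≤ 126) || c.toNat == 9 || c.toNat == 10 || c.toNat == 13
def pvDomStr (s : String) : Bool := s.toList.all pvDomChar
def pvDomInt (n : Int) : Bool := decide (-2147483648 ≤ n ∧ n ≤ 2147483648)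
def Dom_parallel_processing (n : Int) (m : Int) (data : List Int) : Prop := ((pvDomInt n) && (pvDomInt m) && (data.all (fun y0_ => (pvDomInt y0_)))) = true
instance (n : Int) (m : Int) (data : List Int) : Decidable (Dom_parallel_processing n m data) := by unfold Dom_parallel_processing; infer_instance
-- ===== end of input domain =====

-- B replaces A's heapq priority queue by a per-thread available-time array scanned
-- linearly for its first minimum per job (same results; no heap is maintained).


-- ===== PORT A =====
-- heapq tuple comparison: lexicographic minimum of two (available_time, thread_id) pairs
def pvLexMin (p q : Int × Int) : Int × Int :=
  if p.1 < q.1 ∨ (p.1 = q.1 ∧ p.2 ≤ q.2) then p else q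

-- heapq ported at the priority-queue level: the heap list is kept as the multiset of its
-- entries; heappop returns the lexicographically least (time, id) pair — exactly the pair
-- Python's heappop returns — and heappush appends the new pair.  Exact: the heap's internal
-- array layout is unobservable, every pop yields the global minimum.
def pvLoopA (queue : List (Int × Int)) (jobs : List Int) (output : List (Int × Int)) :
    List (Int × Int) :=
  match jobs with
  | [] => output.reverse
  | t :: rest =>
    match queue with
    | [] => output.reverse   -- Python: heappop of an empty heap raises IndexError (outside Pre_)
    | x :: xs =>
      let p := xs.foldl pvLexMin x
      let start := max t p.1
      let fin := start + t
      pvLoopA ((x :: xs).erase p ++ [(fin, p.2)]) rest ((p.2, start) :: output)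

def parallel_processing (n : Int) (m : Int) (data : List Int) : List (Int × Int) :=
  pvLoopA ((PySem.List.pyRange 0 n 1).map (fun i => ((0 : Int), i))) data []

-- ===== PORT B =====
-- inner scan `for i in range(1, n): if avail[i] < avail[best]: best = i`
-- (every index the loop produces is in range, so pyGetD's default is never used: exact)
def pvScanMin (avail : List Int) (n : Int) : Int :=
  (PySem.List.pyRange 1 n 1).foldl
    (fun b i => if PySem.List.pyGetD avail i 0 < PySem.List.pyGetD avail b 0 then i else b) 0

def pvLoopB (n : Int) (avail : List Int) (jobs : List Int) (out : List (Int × Int)) :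
    List (Int × Int) :=
  match jobs with
  | [] => out.reverse
  | t :: rest =>
    match avail with
    | [] => out.reverse   -- Python: avail[best] raises IndexError when n <= 0 (outside Pre_)
    | _ :: _ =>
      let best := pvScanMin avail n
      let a := PySem.List.pyGetD avail best 0
      let s := if a > t then a else t
      pvLoopB n (avail.set best.toNat (s + t)) rest ((best, s) :: out)

def parallel_processing_alt (n : Int) (m : Int) (data : List Int) : List (Int × Int) :=
  pvLoopB n (List.replicate n.toNat 0) data []

-- ===== PRECONDITION & SPEC =====
-- Pre_ excludes only inputs where BOTH Pythons raise IndexError: n <= 0 with a nonempty job list.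
def Pre_parallel_processing (n : Int) (m : Int) (data : List Int) : Prop :=
  data = [] ∨ 1 ≤ n
instance (n : Int) (m : Int) (data : List Int) : Decidable (Pre_parallel_processing n m data) := by
  unfold Pre_parallel_processing; infer_instance
def pvWitness_parallel_processing : Int × Int × List Int := (2, 3, [1, 2, 3])

def Spec_parallel_processing (n : Int) (m : Int) (data : List Int) (out : List (Int × Int)) : Prop := out = parallel_processing_alt n m data
instance (n : Int) (m : Int) (data : List Int) (out : List (Int × Int)) : Decidable (Spec_parallel_processing n m data out) := by unfold Spec_parallel_processing; infer_instance

-- ===== CLAIM (what is proved, stated in full; the proofs are below) =====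
def Claim_equal_parallel_processing : Prop := ∀ (n : Int) (m : Int) (data : List Int), Dom_parallel_processing n m data → Pre_parallel_processing n m data → Spec_parallel_processing n m data (parallel_processing n m data)

-- ===== LEMMAS AND PROOFS =====

-- lexicographic order on (time, id) pairs, the order heapq pops in
def pvLexLE (p q : Int × Int) : Prop := p.1 < q.1 ∨ (p.1 = q.1 ∧ p.2 ≤ q.2)

theorem pvLexLE_refl (p : Int × Int) : pvLexLE p p := by
  unfold pvLexLE; omega

theorem pvLexLE_trans {p q r : Int × Int} (h1 : pvLexLE p q) (h2 : pvLexLE q r) : pvLexLE p r := by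
  unfold pvLexLE at *; omega

theorem pvLexLE_antisymm {p q : Int × Int} (h1 : pvLexLE p q) (h2 : pvLexLE q p) : p = q := by
  unfold pvLexLE at h1 h2
  exact Prod.ext (by omega) (by omega)

theorem pvLexMin_left_or_right (p q : Int × Int) : pvLexMin p q = p ∨ pvLexMin p q = q := by
  unfold pvLexMin; split_ifs <;> simp

theorem pvLexLE_pvLexMin_left (p q : Int × Int) : pvLexLE (pvLexMin p q) p := by
  unfold pvLexMin pvLexLE; split_ifs with h <;> omega

theorem pvLexLE_pvLexMin_right (p q : Int × Int) : pvLexLE (pvLexMin p q) q := by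
  unfold pvLexMin pvLexLE; split_ifs with h <;> omega

theorem foldl_pvLexMin_mem (xs : List (Int × Int)) : ∀ x, xs.foldl pvLexMin x ∈ x :: xs := by
  induction xs with
  | nil => simp
  | cons z zs ih =>
    intro x
    simp only [List.foldl_cons]
    rcases List.mem_cons.mp (ih (pvLexMin x z)) with he | hm
    · rw [he]
      rcases pvLexMin_left_or_right x z with h2 | h2 <;> rw [h2] <;> simp
    · exact List.mem_cons_of_mem _ (List.mem_cons_of_mem _ hm)

theorem foldl_pvLexMin_le_seed (xs : List (Int × Int)) : ∀ x, pvLexLE (xs.foldl pvLexMin x) x := by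
  induction xs with
  | nil => intro x; exact pvLexLE_refl x
  | cons z zs ih =>
    intro x
    exact pvLexLE_trans (ih (pvLexMin x z)) (pvLexLE_pvLexMin_left x z)

theorem foldl_pvLexMin_le (xs : List (Int × Int)) :
    ∀ x, ∀ y ∈ x :: xs, pvLexLE (xs.foldl pvLexMin x) y := by
  induction xs with
  | nil =>
    intro x y hy
    simp only [List.mem_singleton] at hy; subst hy; exact pvLexLE_refl y
  | cons z zs ih =>
    intro x y hy
    rcases List.mem_cons.mp hy with rfl | hy'
    · exact foldl_pvLexMin_le_seed (z :: zs) y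
    · rcases List.mem_cons.mp hy' with rfl | hy''
      · exact pvLexLE_trans (foldl_pvLexMin_le_seed zs (pvLexMin x y))
          (pvLexLE_pvLexMin_right x y)
      · exact ih (pvLexMin x z) y (List.mem_cons_of_mem _ hy'')

theorem pyGetD_replicate_zero (k : Nat) (j : Int) :
    PySem.List.pyGetD (List.replicate k (0 : Int)) j 0 = 0 := by
  simp only [PySem.List.pyGetD, PySem.List.pyGet?, PySem.List.pyIdx?]
  split_ifs <;> simp [List.getElem?_replicate] <;> split_ifs <;> simp

-- the (avail[i], i) pairs the heap is, at every step, a permutation of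
def pvL (av : List Int) : List (Int × Int) :=
  (PySem.List.enumerate av 0).map (fun p => (p.2, p.1))

theorem length_pvL (av : List Int) : (pvL av).length = av.length := by
  simp [pvL, PySem.List.length_enumerate]

theorem getElem?_pvL (av : List Int) (k : Nat) :
    (pvL av)[k]? = av[k]?.map (fun x => (x, (k : Int))) := by
  simp [pvL, PySem.List.getElem?_enumerate]
  cases av[k]? <;> simp

theorem mem_pvL {av : List Int} {y : Int × Int} :
    y ∈ pvL av ↔ ∃ k : Nat, k < av.length ∧ y = (av.getD k 0, (k : Int)) := by
  rw [List.mem_iff_getElem?]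
  constructor
  · rintro ⟨k, hk⟩
    rw [getElem?_pvL] at hk
    rcases h : av[k]? with _ | a
    · rw [h] at hk; simp at hk
    · rw [h] at hk
      have hlt : k < av.length := List.getElem?_eq_some_iff.mp h |>.1
      refine ⟨k, hlt, ?_⟩
      have : av.getD k 0 = a := by
        rw [List.getD_eq_getElem?_getD, h]; rfl
      simp at hk
      rw [this]; exact hk.symm
  · rintro ⟨k, hk, rfl⟩
    refine ⟨k, ?_⟩
    rw [getElem?_pvL, List.getElem?_eq_getElem hk]
    simp [List.getD_eq_getElem?_getD, List.getElem?_eq_getElem hk]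

-- `j` is the first index achieving the minimal available time
def pvIsBest (av : List Int) (j : Nat) : Prop :=
  j < av.length ∧ ∀ i : Nat, i < av.length →
    pvLexLE (av.getD j 0, (j : Int)) (av.getD i 0, (i : Int))

theorem scan_aux (av : List Int) : ∀ k : Nat, 1 ≤ k → k ≤ av.length →
    ∃ j : Nat, (PySem.List.pyRange 1 (k : Int) 1).foldl
        (fun b i => if PySem.List.pyGetD av i 0 < PySem.List.pyGetD av b 0 then i else b) 0
      = (j : Int) ∧ j < k ∧ ∀ i : Nat, i < k →
        pvLexLE (av.getD j 0, (j : Int)) (av.getD i 0, (i : Int)) := by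
  intro k
  induction k with
  | zero => omega
  | succ k ih =>
    intro _ hkl
    by_cases hk1 : 1 ≤ k
    · obtain ⟨j, hfold, hjk, hle⟩ := ih hk1 (by omega)
      have hrange : PySem.List.pyRange 1 ((k + 1 : Nat) : Int) 1
          = PySem.List.pyRange 1 (k : Int) 1 ++ [(k : Int)] := by
        push_cast
        exact PySem.List.pyRange_one_succ_right (by exact_mod_cast hk1)
      rw [hrange, List.foldl_append, hfold]
      simp only [List.foldl]
      rw [PySem.List.pyGetD_of_nonneg av 0 (Int.natCast_nonneg k),
          PySem.List.pyGetD_of_nonneg av 0 (Int.natCast_nonneg j),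
          Int.toNat_natCast, Int.toNat_natCast]
      by_cases hlt : av.getD k 0 < av.getD j 0
      · refine ⟨k, by rw [if_pos hlt], by omega, ?_⟩
        intro i hi
        by_cases hik : i < k
        · have := hle i hik
          unfold pvLexLE at this ⊢
          omega
        · have : i = k := by omega
          subst this
          exact pvLexLE_refl _
      · refine ⟨j, by rw [if_neg hlt], by omega, ?_⟩
        intro i hi
        by_cases hik : i < k
        · exact hle i hik
        · have : i = k := by omega
          subst this
          unfold pvLexLE
          omega
    · have hk0 : k = 0 := by omega
      subst hk0
      refine ⟨0, ?_, by omega, ?_⟩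
      · rw [PySem.List.pyRange_one_eq_nil (by norm_num)]
        rfl
      · intro i hi
        have : i = 0 := by omega
        subst this
        exact pvLexLE_refl _

theorem scan_best (av : List Int) (h : av ≠ []) :
    ∃ j : Nat, pvScanMin av (av.length : Int) = (j : Int) ∧ pvIsBest av j := by
  have hlen : 1 ≤ av.length := List.length_pos_iff.mpr h
  obtain ⟨j, hfold, hjk, hle⟩ := scan_aux av av.length hlen le_rfl
  exact ⟨j, hfold, hjk, hle⟩

theorem pop_eq (av : List Int) (j : Nat) (hb : pvIsBest av j) (x : Int × Int)
    (xs : List (Int × Int)) (hperm : (x :: xs).Perm (pvL av)) :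
    xs.foldl pvLexMin x = (av.getD j 0, (j : Int)) := by
  have hmem : xs.foldl pvLexMin x ∈ pvL av :=
    (hperm.mem_iff).mp (foldl_pvLexMin_mem xs x)
  obtain ⟨k, hk, hkeq⟩ := mem_pvL.mp hmem
  have hc : ((av.getD j 0, (j : Int)) : Int × Int) ∈ x :: xs :=
    (hperm.mem_iff).mpr (mem_pvL.mpr ⟨j, hb.1, rfl⟩)
  have h1 : pvLexLE (xs.foldl pvLexMin x) (av.getD j 0, (j : Int)) :=
    foldl_pvLexMin_le xs x _ hc
  have h2 : pvLexLE (av.getD j 0, (j : Int)) (xs.foldl pvLexMin x) := by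
    rw [hkeq]; exact hb.2 k hk
  exact pvLexLE_antisymm h1 h2

theorem pvL_set (av : List Int) (j : Nat) (v : Int) :
    pvL (av.set j v) = (pvL av).set j (v, (j : Int)) := by
  apply List.ext_getElem?
  intro k
  rw [getElem?_pvL, List.getElem?_set, List.getElem?_set, getElem?_pvL, length_pvL]
  by_cases hkj : j = k
  · subst hkj
    by_cases hk : j < av.length <;> simp [hk]
  · simp [hkj]

theorem step_perm (av : List Int) (j : Nat) (hj : j < av.length) (v : Int)
    (queue : List (Int × Int)) (hperm : queue.Perm (pvL av)) :
    (queue.erase (av.getD j 0, (j : Int)) ++ [(v, (j : Int))]).Perm (pvL (av.set j v)) := by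
  have hjL : j < (pvL av).length := by rw [length_pvL]; exact hj
  have hgetj : (pvL av)[j] = (av.getD j 0, (j : Int)) := by
    have h1 := getElem?_pvL av j
    rw [List.getElem?_eq_getElem hjL, List.getElem?_eq_getElem hj] at h1
    simp only [Option.map_some] at h1
    have h2 : av.getD j 0 = av[j] := List.getD_eq_getElem av 0 hj
    rw [h2]
    exact Option.some_injective _ h1
  have hsplit : pvL av = (pvL av).take j ++ (av.getD j 0, (j : Int)) :: (pvL av).drop (j + 1) := by
    conv_lhs => rw [← List.take_append_drop j (pvL av), List.drop_eq_getElem_cons hjL, hgetj]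
  have hmid : ((pvL av).take j ++ (av.getD j 0, (j : Int)) :: (pvL av).drop (j + 1)).Perm
      ((av.getD j 0, (j : Int)) :: ((pvL av).take j ++ (pvL av).drop (j + 1))) :=
    List.perm_middle
  have hPm : (pvL av).Perm
      ((av.getD j 0, (j : Int)) :: ((pvL av).take j ++ (pvL av).drop (j + 1))) := by
    conv_lhs => rw [hsplit]
    exact hmid
  have he1 : (queue.erase (av.getD j 0, (j : Int))).Perm
      ((pvL av).take j ++ (pvL av).drop (j + 1)) := by
    have := List.Perm.erase (av.getD j 0, (j : Int)) (hperm.trans hPm)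
    rwa [List.erase_cons_head] at this
  have hR : pvL (av.set j v) = (pvL av).take j ++ (v, (j : Int)) :: (pvL av).drop (j + 1) := by
    rw [pvL_set, List.set_eq_take_append_cons_drop, if_pos hjL]
  rw [hR]
  exact (he1.append_right _).trans
    ((List.perm_append_singleton _ _).trans List.perm_middle.symm)

theorem loop_eq (jobs : List Int) : ∀ (av : List Int) (queue : List (Int × Int))
    (out : List (Int × Int)), queue.Perm (pvL av) →
    pvLoopA queue jobs out = pvLoopB (av.length : Int) av jobs out := by
  induction jobs with
  | nil => intro av queue out _; simp [pvLoopA, pvLoopB]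
  | cons t rest ih =>
    intro av queue out hperm
    cases av with
    | nil =>
      have hq : queue = [] := by
        have hl := hperm.length_eq
        rw [length_pvL] at hl
        exact List.eq_nil_of_length_eq_zero hl
      subst hq
      simp [pvLoopA, pvLoopB]
    | cons a av' =>
      cases queue with
      | nil =>
        exfalso
        have hl := hperm.length_eq
        rw [length_pvL] at hl
        simp at hl
      | cons x xs =>
        obtain ⟨j, hscan, hbest⟩ := scan_best (a :: av') (by simp)
        have hp := pop_eq (a :: av') j hbest x xs hperm
        simp only [pvLoopA, pvLoopB, hp, hscan]
        rw [PySem.List.pyGetD_of_nonneg (a :: av') 0 (Int.natCast_nonneg j), Int.toNat_natCast]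
        have hs : max t ((a :: av').getD j 0)
            = (if (a :: av').getD j 0 > t then (a :: av').getD j 0 else t) := by
          rw [max_def]; split_ifs <;> omega
        rw [hs]
        have hrec := ih ((a :: av').set j
            ((if (a :: av').getD j 0 > t then (a :: av').getD j 0 else t) + t))
          ((x :: xs).erase ((a :: av').getD j 0, (j : Int)) ++
            [((if (a :: av').getD j 0 > t then (a :: av').getD j 0 else t) + t, (j : Int))])
          (((j : Int), if (a :: av').getD j 0 > t then (a :: av').getD j 0 else t) :: out)
          (step_perm (a :: av') j hbest.1 _ _ hperm)
        rw [List.length_set] at hrec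
        exact hrec

theorem init_pvL (n : Int) (hn : 0 ≤ n) :
    ((PySem.List.pyRange 0 n 1).map (fun i => ((0 : Int), i))) =
      pvL (List.replicate n.toNat 0) := by
  unfold pvL
  rw [PySem.List.enumerate_eq_map_pyRange (List.replicate n.toNat 0) 0, List.map_map]
  have hlen : PySem.List.len (List.replicate n.toNat (0 : Int)) = n := by
    simp [PySem.List.len, Int.toNat_of_nonneg hn]
  rw [hlen]
  apply List.map_congr_left
  intro i _
  simp only [Function.comp]
  rw [pyGetD_replicate_zero]

theorem parallel_processing_spec : Claim_equal_parallel_processing := by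
  intro n m data _ hpre
  unfold Spec_parallel_processing parallel_processing parallel_processing_alt
  rcases hpre with rfl | hn
  · simp [pvLoopA, pvLoopB]
  · have h0 : (0 : Int) ≤ n := by omega
    rw [init_pvL n h0,
      loop_eq data (List.replicate n.toNat 0) (pvL (List.replicate n.toNat 0)) []
        (List.Perm.refl _), List.length_replicate, Int.toNat_of_nonneg h0]
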